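-- pv_equiv track=rewrite | github.com/sseongeun/Baekjoon | 백준/Bronze/8958. OX퀴즈/OX퀴즈.py | check
-- ===== SOURCE A (Python) =====
-- def check(L):
--     cur=0
--     sum=0
--     for i in range(len(L)):
--         if(L[i]=="O"):
--             cur+=1
--             sum+=cur
--         else:
--             cur=0
--     return sum
-- ===== SOURCE B (Python) =====
-- def check(L):
--     # Run-length pass: find each maximal run of "O" and add its triangular number.
--     total = 0
--     i = 0
--     n = len(L)
--     while i < n:
--         if L[i] == "O":
--             j = i
--             while j < n and L[j] == "O":
--                 j += 1
--             k = j - i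
--             total += k * (k + 1) // 2
--             i = j
--         else:
--             i += 1
--     return total
-- ===== Notes on version B (the rewrite author's own statement) =====
-- stated objective: alternative
-- what changed: Replaced the per-element running streak counter with a run-length scan that jumps over each maximal run of "O" and adds its closed-form triangular number k*(k+1)//2.
import Mathlib
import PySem

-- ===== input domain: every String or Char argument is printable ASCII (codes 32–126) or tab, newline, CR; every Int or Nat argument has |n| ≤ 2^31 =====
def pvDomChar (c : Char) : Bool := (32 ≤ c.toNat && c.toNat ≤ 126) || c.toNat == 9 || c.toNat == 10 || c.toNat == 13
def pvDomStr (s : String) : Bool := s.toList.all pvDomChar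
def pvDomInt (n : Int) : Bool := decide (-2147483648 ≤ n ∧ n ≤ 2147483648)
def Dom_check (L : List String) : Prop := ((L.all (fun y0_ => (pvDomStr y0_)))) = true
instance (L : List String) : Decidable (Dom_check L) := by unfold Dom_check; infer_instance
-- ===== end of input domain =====

-- B replaces A's per-element running streak counter with a run-length pass
-- adding the closed-form triangular number for each maximal run of "O" (alternative, same cost).


-- ===== PORT A =====
-- A iterates over the elements keeping (cur, sum); ported as a left fold with that pair.
def check (L : List String) : Int :=
  (L.foldl (fun (st : Int × Int) x =>
      if x = "O" then (st.1 + 1, st.2 + (st.1 + 1)) else (0, st.2)) (0, 0)).2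

-- ===== PORT B =====
-- B scans the next maximal run of "O" (inner while-loop ported as takeWhile/dropWhile),
-- adds k*(k+1)//2 for its length k, and continues after the run.
def check_alt (L : List String) : Int :=
  match L with
  | [] => 0
  | x :: xs =>
    if x = "O" then
      let k : Int := 1 + ((xs.takeWhile (fun y => y = "O")).length : Int)
      PySem.Int.floordiv (k * (k + 1)) 2 + check_alt (xs.dropWhile (fun y => y = "O"))
    else check_alt xs
termination_by L.length
decreasing_by
  · have := List.length_dropWhile_le (p := fun y => decide (y = "O")) (l := xs)
    simp at *; omega
  · simp

-- ===== PRECONDITION & SPEC =====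
def Spec_check (L : List String) (out : Int) : Prop := out = check_alt L
instance (L : List String) (out : Int) : Decidable (Spec_check L out) := by unfold Spec_check; infer_instance

-- ===== CLAIM (what is proved, stated in full; the proofs are below) =====
def Claim_equal_check : Prop := ∀ (L : List String), Dom_check L → Spec_check L (check L)

-- ===== LEMMAS AND PROOFS =====

def pvTri (k : Int) : Int := PySem.Int.floordiv (k * (k + 1)) 2

lemma pvTri_succ (k : Int) : pvTri (k + 1) = (k + 1) + pvTri k := by
  obtain ⟨m, hm⟩ := Int.even_mul_succ_self k
  have h2 : k * (k + 1) = 2 * m := by omega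
  have h3 : (k + 1) * (k + 1 + 1) = 2 * (m + (k + 1)) := by linear_combination h2
  unfold pvTri
  rw [h2, h3, PySem.Int.floordiv_eq_ediv_of_pos (by omega), PySem.Int.floordiv_eq_ediv_of_pos (by omega)]
  omega

lemma pvTri_zero : pvTri 0 = 0 := by decide

lemma check_alt_run_split (L : List String) :
    check_alt L = pvTri ((L.takeWhile (fun y => y = "O")).length : Int)
      + check_alt (L.dropWhile (fun y => y = "O")) := by
  cases L with
  | nil => simp [check_alt, pvTri_zero]
  | cons x xs =>
    by_cases h : x = "O"
    · simp [check_alt, h, pvTri, List.takeWhile, List.dropWhile]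
      ring_nf
    · simp [check_alt, h, List.takeWhile, List.dropWhile, pvTri_zero]

lemma check_fold_eq (L : List String) : ∀ (c s : Int), 0 ≤ c →
    (L.foldl (fun (st : Int × Int) x =>
        if x = "O" then (st.1 + 1, st.2 + (st.1 + 1)) else (0, st.2)) (c, s)).2
      = s + check_alt L + c * ((L.takeWhile (fun y => y = "O")).length : Int) := by
  induction L with
  | nil => intro c s _; simp [check_alt]
  | cons x xs ih =>
    intro c s hc
    by_cases h : x = "O"
    · subst h
      rw [List.foldl_cons, if_pos rfl, ih (c + 1) (s + (c + 1)) (by omega)]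
      have hsplit := check_alt_run_split xs
      have htri := pvTri_succ ((xs.takeWhile (fun y => y = "O")).length : Int)
      have hB : check_alt ("O" :: xs)
          = pvTri (((xs.takeWhile (fun y => y = "O")).length : Int) + 1)
            + check_alt (xs.dropWhile (fun y => y = "O")) := by
        simp [check_alt, pvTri]
        ring_nf
      rw [hB, htri, List.takeWhile_cons]
      simp only [decide_true]
      rw [hsplit]
      push_cast [List.length_cons]
      ring
    · rw [List.foldl_cons, if_neg h, ih 0 s le_rfl]
      simp [check_alt, h]

-- ===== VERDICT (by name: the statement is the Claim_ definition above) =====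
theorem check_spec : Claim_equal_check := by
  intro L _
  unfold Spec_check check
  rw [check_fold_eq L 0 0 (le_refl 0)]
  simp
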